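-- pv_equiv track=rewrite | github.com/stuart-presnell/Advent-of-Code-2019 | Problem03b.py | follow_segment
-- ===== SOURCE A (Python) =====
-- def follow_segment(seg, start):
--     """Given a segment, like ('R', 5), and a starting point like (3,10),
--     return a list of the points added to the trail by following that segment.
--     Problem 3b: Also with each point record the step count"""
--     pts = []
--     (x0,y0,s0) = start
--     (dir, dist) = seg
--     if   dir == 'R':
--         return [(x0 + x + 1, y0, s0 + x + 1) for x in range(dist)]
--     elif dir == 'L':
--         return [(x0 - x - 1, y0, s0 + x + 1) for x in range(dist)]
--     elif dir == 'U':
--         return [(x0, y0 + y + 1, s0 + y + 1) for y in range(dist)]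
--     elif dir == 'D':
--         return [(x0, y0 - y - 1, s0 + y + 1) for y in range(dist)]
--     else:
--         raise ValueError(dir + " is not a valid direction")
-- ===== SOURCE B (Python) =====
-- def follow_segment(seg, start):
--     """Given a segment, like ('R', 5), and a starting point like (3,10),
--     return a list of the points added to the trail by following that segment.
--     Problem 3b: Also with each point record the step count"""
--     (dir, dist) = seg
--     if   dir == 'R':
--         (dx, dy) = (1, 0)
--     elif dir == 'L':
--         (dx, dy) = (-1, 0)
--     elif dir == 'U':
--         (dx, dy) = (0, 1)
--     elif dir == 'D':
--         (dx, dy) = (0, -1)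
--     else:
--         raise ValueError(dir + " is not a valid direction")
--     (x, y, s) = start
--     pts = []
--     for _ in range(dist):
--         x += dx
--         y += dy
--         s += 1
--         pts.append((x, y, s))
--     return pts
-- ===== Notes on version B (the rewrite author's own statement) =====
-- stated objective: alternative
-- what changed: Replaces the four per-direction closed-form index comprehensions by a single accumulator loop that first resolves the direction into a unit delta (dx,dy) and then steps the running position and step count once per iteration.
import Mathlib
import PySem

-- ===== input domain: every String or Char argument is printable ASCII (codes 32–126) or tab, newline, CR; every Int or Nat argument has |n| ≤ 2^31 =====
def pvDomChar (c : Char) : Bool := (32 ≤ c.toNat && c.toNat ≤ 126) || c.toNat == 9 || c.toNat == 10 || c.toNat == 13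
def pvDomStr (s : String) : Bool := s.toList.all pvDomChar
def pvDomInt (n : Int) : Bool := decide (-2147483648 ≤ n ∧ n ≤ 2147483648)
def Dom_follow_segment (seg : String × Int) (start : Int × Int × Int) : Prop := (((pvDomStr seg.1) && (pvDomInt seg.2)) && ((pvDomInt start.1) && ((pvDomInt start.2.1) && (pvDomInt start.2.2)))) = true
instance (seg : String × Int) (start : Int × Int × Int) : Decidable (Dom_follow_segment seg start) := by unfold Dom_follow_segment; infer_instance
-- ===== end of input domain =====

-- B resolves the direction into a unit delta once and then runs a single accumulator loop
-- (running position and step count), instead of A's four per-direction closed-form comprehensions;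
-- same cost, alternative decomposition.


-- ===== PORT A =====
-- Literal port of A: four per-direction list comprehensions over range(dist);
-- the invalid-direction branch raises ValueError in Python (excluded by Pre_), ported as [].
def follow_segment (seg : String × Int) (start : Int × Int × Int) : List (Int × Int × Int) :=
  let x0 := start.1; let y0 := start.2.1; let s0 := start.2.2
  let dir := seg.1; let dist := seg.2
  if dir == "R" then
    (PySem.List.pyRange 0 dist 1).map (fun x => (x0 + x + 1, y0, s0 + x + 1))
  else if dir == "L" then
    (PySem.List.pyRange 0 dist 1).map (fun x => (x0 - x - 1, y0, s0 + x + 1))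
  else if dir == "U" then
    (PySem.List.pyRange 0 dist 1).map (fun y => (x0, y0 + y + 1, s0 + y + 1))
  else if dir == "D" then
    (PySem.List.pyRange 0 dist 1).map (fun y => (x0, y0 - y - 1, s0 + y + 1))
  else
    []  -- Python raises ValueError here; outside Pre_

-- ===== PORT B =====
-- the accumulator loop of Source B: 'for _ in range(dist): x+=dx; y+=dy; s+=1; pts.append(...)'
def followLoop (dx dy : Int) : Nat → Int → Int → Int → List (Int × Int × Int) → List (Int × Int × Int)
  | 0, _, _, _, pts => pts
  | n + 1, x, y, s, pts =>
    followLoop dx dy n (x + dx) (y + dy) (s + 1) (pts ++ [(x + dx, y + dy, s + 1)])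

def follow_segment_alt (seg : String × Int) (start : Int × Int × Int) : List (Int × Int × Int) :=
  let dir := seg.1; let dist := seg.2
  let delta : Option (Int × Int) :=
    if dir == "R" then some (1, 0)
    else if dir == "L" then some (-1, 0)
    else if dir == "U" then some (0, 1)
    else if dir == "D" then some (0, -1)
    else none  -- Python raises ValueError here; outside Pre_
  match delta with
  | none => []
  | some (dx, dy) => followLoop dx dy dist.toNat start.1 start.2.1 start.2.2 []

-- ===== PRECONDITION & SPEC =====
-- Pre_ excludes exactly the inputs where A (and B) raise ValueError: an invalid direction string.
def Pre_follow_segment (seg : String × Int) (start : Int × Int × Int) : Prop :=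
  seg.1 = "R" ∨ seg.1 = "L" ∨ seg.1 = "U" ∨ seg.1 = "D"
instance (seg : String × Int) (start : Int × Int × Int) : Decidable (Pre_follow_segment seg start) := by unfold Pre_follow_segment; infer_instance
def pvWitness_follow_segment : (String × Int) × (Int × Int × Int) := (("R", 3), (2, 5, 7))

def Spec_follow_segment (seg : String × Int) (start : Int × Int × Int) (out : List (Int × Int × Int)) : Prop := out = follow_segment_alt seg start
instance (seg : String × Int) (start : Int × Int × Int) (out : List (Int × Int × Int)) : Decidable (Spec_follow_segment seg start out) := by unfold Spec_follow_segment; infer_instance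

-- ===== CLAIM (what is proved, stated in full; the proofs are below) =====
def Claim_equal_follow_segment : Prop := ∀ (seg : String × Int) (start : Int × Int × Int), Dom_follow_segment seg start → Pre_follow_segment seg start → Spec_follow_segment seg start (follow_segment seg start)

-- ===== LEMMAS AND PROOFS =====

-- the accumulator loop produces the closed-form trail
theorem followLoop_eq (dx dy : Int) : ∀ (n : Nat) (x y s : Int) (pts : List (Int × Int × Int)),
    followLoop dx dy n x y s pts
      = pts ++ (List.range n).map
          (fun k : Nat => (x + dx * ((k : Int) + 1), y + dy * ((k : Int) + 1), s + (k : Int) + 1)) := by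
  intro n
  induction n with
  | zero => intro x y s pts; simp [followLoop]
  | succ n ih =>
    intro x y s pts
    rw [followLoop, ih, List.range_succ_eq_map]
    simp only [List.map_cons, List.map_map, List.append_assoc, List.singleton_append]
    congr 2
    · push_cast
      refine Prod.ext (by ring) (Prod.ext (by ring) (by ring))
    apply List.map_congr_left
    intro k _
    simp only [Function.comp, Nat.succ_eq_add_one]
    push_cast
    refine Prod.ext (by ring) (Prod.ext (by ring) (by ring))

theorem pyRange_zero_map {α : Type} (dist : Int) (f : Int → α) :
    (PySem.List.pyRange 0 dist 1).map f = (List.range dist.toNat).map (fun k : Nat => f (k : Int)) := by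
  rw [PySem.List.pyRange_one, List.map_map]
  simp only [Int.sub_zero]
  apply List.map_congr_left
  intro k _
  simp [Function.comp]

-- ===== VERDICT (by name: the statement is the Claim_ definition above) =====
theorem follow_segment_spec : Claim_equal_follow_segment := by
  intro seg start _ hpre
  obtain ⟨dir, dist⟩ := seg
  obtain ⟨x0, y0, s0⟩ := start
  unfold Spec_follow_segment follow_segment follow_segment_alt
  rcases hpre with h | h | h | h <;> subst h <;>
    simp only [beq_self_eq_true, String.reduceBEq, Bool.false_eq_true, if_true, if_false] <;>
    rw [followLoop_eq, pyRange_zero_map] <;>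
    · simp only [List.nil_append]
      apply List.map_congr_left
      intro k _
      refine Prod.ext (by ring) (Prod.ext (by ring) (by ring))
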